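-- pv_equiv track=rewrite | github.com/cheonsol-lee/coding_test | 코딜리티/(lesson7)StoneWall.py | solution
-- ===== SOURCE A (Python) =====
-- def solution(H):
--     cnt = 0
--     stack = [H[0]]  # 높이 저장
--     for i in range(1, len(H)):
--         if H[i - 1] == H[i]:
--             continue
--         elif H[i - 1] > H[i]:
--             stack.pop()
--             cnt += 1
--
--             while stack:
--                 top = stack[-1]
--                 if top > H[i]:
--                     stack.pop()
--                     cnt += 1
--                 elif top == H[i]:
--                     break
--                 else:
--                     stack.append(H[i])
--                     break
--
--             if not stack:
--                 stack.append(H[i])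
--
--         else:
--             stack.append(H[i])
--
--     while stack:
--         stack.pop()
--         cnt += 1
--
--     return cnt
-- ===== SOURCE B (Python) =====
-- def solution(H):
--     # Stack-free characterisation: a new stone starts at position i unless an
--     # earlier equal height is visible, i.e. some previous height equals H[i]
--     # with no strictly lower height in between.  We scan the already-processed
--     # heights backwards (most recent first) for each element.
--     cnt = 0
--     seen = []  # previously processed heights, in order
--     for h in H:
--         new = True
--         for p in reversed(seen):
--             if p == h:
--                 new = False
--                 break
--             if p < h:
--                 break
--         if new:
--             cnt += 1
--         seen.append(h)
--     return cnt
-- ===== Notes on version B (the rewrite author's own statement) =====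
-- stated objective: alternative
-- what changed: Replaced A's monotonic stack (pops, adjacent H[i-1]/H[i] comparisons, trailing drain counting pops) by a stack-free quadratic characterisation: for each position a backward scan over the earlier heights decides whether a new stone starts there (new unless an equal earlier height is visible with nothing lower in between), and these decisions are summed.
-- outside the precondition, e.g. on solution([]): A raises IndexError, B returns 0
import Mathlib
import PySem

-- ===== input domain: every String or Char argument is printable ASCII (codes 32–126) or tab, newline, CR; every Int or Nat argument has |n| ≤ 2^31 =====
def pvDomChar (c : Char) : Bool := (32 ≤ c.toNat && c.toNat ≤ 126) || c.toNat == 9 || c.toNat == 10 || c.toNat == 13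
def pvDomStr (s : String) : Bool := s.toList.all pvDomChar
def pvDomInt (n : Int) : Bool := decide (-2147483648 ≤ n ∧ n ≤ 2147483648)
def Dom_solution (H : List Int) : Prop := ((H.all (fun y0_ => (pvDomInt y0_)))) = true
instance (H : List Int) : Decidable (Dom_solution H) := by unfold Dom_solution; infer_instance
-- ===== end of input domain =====

-- B drops A's monotonic stack entirely: for each position a backward scan over the
-- earlier heights decides whether a new stone starts there, and the decisions are
-- summed.  A raises IndexError on empty H (reads H[0]); excluded by Pre_solution.

-- ===== PORT A =====
-- stacks are Lean lists with the TOP at the HEAD (Python appends/pops at the end)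
-- inner 'while stack:' loop of A
def solAwhile (h : Int) (stack : List Int) (cnt : Int) : List Int × Int :=
  match stack with
  | [] => ([], cnt)
  | top :: rest =>
    if top > h then solAwhile h rest (cnt + 1)
    else if top = h then (top :: rest, cnt)
    else (h :: top :: rest, cnt)

-- trailing 'while stack: stack.pop(); cnt += 1'
def solAdrain (stack : List Int) (cnt : Int) : Int :=
  match stack with
  | [] => cnt
  | _ :: rest => solAdrain rest (cnt + 1)

-- one iteration of 'for i in range(1, len(H))'; state = (H[i-1], stack, cnt).
-- 'stack.pop()' is ported as List.tail (the pop always happens on a nonempty stack)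
def solAstep (st : Int × List Int × Int) (h : Int) : Int × List Int × Int :=
  let prev := st.1
  let stack := st.2.1
  let cnt := st.2.2
  if prev = h then (h, stack, cnt)
  else if prev > h then
    let r := solAwhile h stack.tail (cnt + 1)
    let stack' := if r.1.isEmpty then [h] else r.1
    (h, stack', r.2)
  else (h, h :: stack, cnt)

def solution (H : List Int) : Int :=
  match H with
  | [] => 0   -- Python raises IndexError here (reads H[0]); excluded by Pre_solution
  | h0 :: rest =>
    let s := rest.foldl solAstep (h0, [h0], 0)
    solAdrain s.2.1 s.2.2

-- ===== PORT B =====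
-- inner 'for p in reversed(seen)' scan: true = a new stone starts here
-- (Python's seen with append + reversed iteration ≙ a Lean list consed at the head)
def bScan (seen : List Int) (h : Int) : Bool :=
  match seen with
  | [] => true
  | p :: t => if p = h then false else if p < h then true else bScan t h

-- one iteration of 'for h in H'; state = (seen most-recent-first, cnt); 'seen.append(h)' = cons
def altStep (st : List Int × Int) (h : Int) : List Int × Int :=
  (h :: st.1, st.2 + (if bScan st.1 h then 1 else 0))

def solution_alt (H : List Int) : Int :=
  (H.foldl altStep ([], 0)).2

-- ===== PRECONDITION & SPEC =====
-- Pre_ excludes only the empty list, on which A raises IndexError (H[0]).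
def Pre_solution (H : List Int) : Prop := H ≠ []
instance (H : List Int) : Decidable (Pre_solution H) := by unfold Pre_solution; infer_instance
def pvWitness_solution : List Int := [8, 8, 5, 7, 9, 8, 7, 4, 8]

def Spec_solution (H : List Int) (out : Int) : Prop := out = solution_alt H
instance (H : List Int) (out : Int) : Decidable (Spec_solution H out) := by unfold Spec_solution; infer_instance

-- ===== CLAIM (what is proved, stated in full; the proofs are below) =====
def Claim_equal_solution : Prop := ∀ (H : List Int), Dom_solution H → Pre_solution H → Spec_solution H (solution H)

-- ===== LEMMAS AND PROOFS =====

-- Proof-side bridge: the textbook monotonic stack.  A is first shown equal to this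
-- stack fold, which is then shown equal to B's scan count via the invariant that
-- "would push h" on the stack ≡ "backward scan over the processed prefix says new".
def popGT (h : Int) (stack : List Int) : List Int :=
  match stack with
  | [] => []
  | top :: rest => if top > h then popGT h rest else top :: rest

def solBstep (st : List Int × Int) (h : Int) : List Int × Int :=
  let s := popGT h st.1
  match s with
  | [] => ([h], st.2 + 1)
  | top :: rest => if top < h then (h :: top :: rest, st.2 + 1) else (top :: rest, st.2)

theorem drain_eq (stack : List Int) (cnt : Int) :
    solAdrain stack cnt = cnt + stack.length := by
  induction stack generalizing cnt with
  | nil => simp [solAdrain]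
  | cons a t ih => simp [solAdrain, ih]; omega

-- A's inner while loop, characterised by popGT
theorem while_eq (h : Int) (s : List Int) (c : Int) :
    solAwhile h s c =
      ((match popGT h s with
        | [] => []
        | top :: rest => if top = h then top :: rest else h :: top :: rest),
       c + ((s.length : Int) - ((popGT h s).length : Int))) := by
  induction s generalizing c with
  | nil => simp [solAwhile, popGT]
  | cons a t ih =>
    simp only [solAwhile, popGT]
    split_ifs with hgt heq
    · rw [ih]
      simp only [Prod.mk.injEq, List.length_cons]
      refine ⟨trivial, ?_⟩
      push_cast; ring
    · subst heq; simp
    · have hl : a < h := by omega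
      simp [heq]

-- the head of popGT's result is never > h
theorem popGT_head (h : Int) (s : List Int) (top : Int) (rest : List Int)
    (hp : popGT h s = top :: rest) : ¬ top > h := by
  induction s with
  | nil => simp [popGT] at hp
  | cons a t ih =>
    simp only [popGT] at hp
    split_ifs at hp with hg
    · exact ih hp
    · cases hp; omega

-- one-step correspondence: A's state (prev, prev :: s', cA), stack state (prev :: s', cB)
-- with cB = cA + |stack|; both steps keep the shapes and the count relation.
theorem step_eq (prev h : Int) (s' : List Int) (cA : Int) :
    ∃ t : List Int,
      solAstep (prev, prev :: s', cA) h = (h, h :: t, (solAstep (prev, prev :: s', cA) h).2.2) ∧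
      solBstep (prev :: s', cA + ((prev :: s').length : Int)) h
        = (h :: t, (solAstep (prev, prev :: s', cA) h).2.2 + ((h :: t).length : Int)) := by
  by_cases he : prev = h
  · subst he
    refine ⟨s', ?_, ?_⟩
    · simp [solAstep]
    · simp [solAstep, solBstep, popGT]
  · by_cases hgt : prev > h
    · have hB : popGT h (prev :: s') = popGT h s' := by simp [popGT, hgt]
      rcases hp : popGT h s' with _ | ⟨top, rest⟩
      · refine ⟨[], ?_, ?_⟩
        · simp [solAstep, he, hgt, while_eq, hp, List.isEmpty]
        · simp [solAstep, solBstep, he, hgt, while_eq, hB, hp, List.isEmpty]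
          try omega
      · by_cases ht : top = h
        · subst ht
          refine ⟨rest, ?_, ?_⟩
          · simp [solAstep, he, hgt, while_eq, hp, List.isEmpty]
          · simp [solAstep, solBstep, he, hgt, while_eq, hB, hp, List.isEmpty]
            omega
        · have hlt : top < h := by
            have := popGT_head h s' top rest hp
            omega
          refine ⟨top :: rest, ?_, ?_⟩
          · simp [solAstep, he, hgt, while_eq, hp, ht, List.isEmpty]
          · simp [solAstep, solBstep, he, hgt, while_eq, hB, hp, ht, hlt, List.isEmpty]
            omega
    · have hlt : prev < h := by omega
      refine ⟨prev :: s', ?_, ?_⟩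
      · simp [solAstep, he, hgt]
      · simp [solAstep, solBstep, popGT, he, hgt, hlt]
        omega

-- fold correspondence over the rest of the list
theorem fold_eq (rest : List Int) (prev : Int) (s' : List Int) (cA : Int) :
    ∃ (p : Int) (t : List Int) (c : Int),
      rest.foldl solAstep (prev, prev :: s', cA) = (p, p :: t, c) ∧
      rest.foldl solBstep (prev :: s', cA + ((prev :: s').length : Int))
        = (p :: t, c + ((p :: t).length : Int)) := by
  induction rest generalizing prev s' cA with
  | nil => exact ⟨prev, s', cA, rfl, rfl⟩
  | cons h r ih =>
    obtain ⟨t, hA, hB⟩ := step_eq prev h s' cA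
    rw [List.foldl_cons, List.foldl_cons, hA, hB]
    exact ih h t _

-- A equals the stack fold
theorem sol_eq_stack (H : List Int) (hne : H ≠ []) :
    solution H = (H.foldl solBstep ([], 0)).2 := by
  cases H with
  | nil => exact absurd rfl hne
  | cons h0 rest =>
    obtain ⟨p, t, c, hA, hB⟩ := fold_eq rest h0 [] 0
    have hB0 : solBstep ([], 0) h0 = ([h0], 1) := by simp [solBstep, popGT]
    have h1 : (0 : Int) + ((([h0] : List Int)).length : Int) = 1 := by simp
    rw [h1] at hB
    have e1 : solution (h0 :: rest)
        = solAdrain (rest.foldl solAstep (h0, [h0], 0)).2.1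
            (rest.foldl solAstep (h0, [h0], 0)).2.2 := rfl
    have e2 : (((h0 :: rest).foldl solBstep ([], 0)).2)
        = (rest.foldl solBstep (solBstep ([], 0) h0)).2 := rfl
    rw [e1, e2, hB0, hB, hA, drain_eq]

-- "the stack fold would push h": stack empty after popping >h, or new top < h
def pushQ (h : Int) (s : List Int) : Bool :=
  match popGT h s with
  | [] => true
  | top :: _ => decide (top < h)

-- the stack part of one stack-fold step
def stepStack (h : Int) (s : List Int) : List Int := (solBstep (s, 0) h).1

theorem solBstep_split (s : List Int) (c h : Int) :
    solBstep (s, c) h = (stepStack h s, c + (if pushQ h s then 1 else 0)) := by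
  rcases hp : popGT h s with _ | ⟨top, rest⟩
  · simp [solBstep, stepStack, pushQ, hp]
  · by_cases hlt : top < h <;> simp [solBstep, stepStack, pushQ, hp, hlt]

-- popping below a lower bound factors through a higher pop
theorem popGT_popGT (g h : Int) (hgh : g < h) (s : List Int) :
    popGT g (popGT h s) = popGT g s := by
  induction s with
  | nil => rfl
  | cons a t ih =>
    by_cases ha : a > h
    · have : a > g := by omega
      simp [popGT, ha, this, ih]
    · simp [popGT, ha]

-- key invariant step: after a stack step with h, "would push g" is decided by h
-- exactly as the backward scan decides it at the new head h
theorem step_pushQ (g h : Int) (s : List Int) :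
    pushQ g (stepStack h s) =
      (if h = g then false else if h < g then true else pushQ g s) := by
  have hX : ∃ X : List Int, stepStack h s = h :: X ∧
      (∀ g', g' < h → popGT g' X = popGT g' s) := by
    simp only [stepStack, solBstep]
    rcases hp : popGT h s with _ | ⟨top, rest⟩
    · exact ⟨[], rfl, fun g' hg' => by
        rw [← popGT_popGT g' h hg' s, hp]⟩
    · by_cases hlt : top < h
      · refine ⟨top :: rest, by simp [hlt], fun g' hg' => ?_⟩
        rw [← popGT_popGT g' h hg' s, hp]
      · have htop : top = h := by
          have := popGT_head h s top rest hp
          omega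
        refine ⟨rest, by simp [htop], fun g' hg' => ?_⟩
        rw [← popGT_popGT g' h hg' s, hp, htop]
        simp [popGT, hg']
  obtain ⟨X, hst, hpop⟩ := hX
  rw [hst]
  by_cases heq : h = g
  · subst heq
    simp [pushQ, popGT]
  · by_cases hlt : h < g
    · simp only [pushQ, popGT]
      have : ¬ h > g := by omega
      simp [this, hlt, heq]
    · have hg : g < h := by omega
      have : h > g := hg
      simp only [pushQ, popGT, this, if_pos, hpop g hg]
      simp [heq, hlt]

-- the two folds keep equal counters under the invariant pushQ · s = bScan seen
theorem fold_stack_scan (L : List Int) (s seen : List Int) (c : Int)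
    (hinv : ∀ g, pushQ g s = bScan seen g) :
    (L.foldl solBstep (s, c)).2 = (L.foldl altStep (seen, c)).2 := by
  induction L generalizing s seen c with
  | nil => rfl
  | cons h t ih =>
    rw [List.foldl_cons, List.foldl_cons, solBstep_split]
    simp only [altStep]
    rw [hinv h]
    apply ih
    intro g
    rw [step_pushQ, hinv g]
    simp [bScan]

-- ===== VERDICT (by name: the statement is the Claim_ definition above) =====
theorem solution_spec : Claim_equal_solution := by
  intro H _ hpre
  unfold Spec_solution solution_alt
  rw [sol_eq_stack H hpre]
  exact fold_stack_scan H [] [] 0 (fun g => by simp [pushQ, popGT, bScan])
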